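-- pv_equiv track=rewrite | github.com/davidbirkenberger/webevent-xai-dashboard | preprocessing.py | merge_text_with_segments
-- ===== SOURCE A (Python) =====
-- def merge_text_with_segments(meta_title, meta_desc, main_h1, main_content, about_h1="", about_content=""):
--     parts = {
--         "meta_title": meta_title,
--         "meta_desc": meta_desc,
--         "main_h1": main_h1,
--         "main_content": main_content,
--         "about_h1": about_h1,
--         "about_content": about_content,
--     }
--
--     text_segments = {}
--     full_text = ""
--     current_start = 0
--
--     for key, value in parts.items():
--         segment = value.strip()
--         if segment:
--             full_text += segment + " "
--             start = current_start
--             end = start + len(segment.strip().split())  # word-level fallback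
--             text_segments[key] = (start, end)
--             current_start = end
--
--     return full_text.strip(), text_segments
-- ===== SOURCE B (Python) =====
-- from itertools import accumulate
--
--
-- def merge_text_with_segments(meta_title, meta_desc, main_h1, main_content, about_h1="", about_content=""):
--     parts = [
--         ("meta_title", meta_title),
--         ("meta_desc", meta_desc),
--         ("main_h1", main_h1),
--         ("main_content", main_content),
--         ("about_h1", about_h1),
--         ("about_content", about_content),
--     ]
--     kept = [(key, value.strip()) for key, value in parts if value.strip()]
--     full_text = " ".join(seg for _, seg in kept)
--     word_counts = [len(seg.split()) for _, seg in kept]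
--     ends = list(accumulate(word_counts))
--     starts = [0] + ends[:-1]
--     text_segments = {key: (start, end)
--                      for (key, _), start, end in zip(kept, starts, ends)}
--     return full_text, text_segments
-- ===== Notes on version B (the rewrite author's own statement) =====
-- stated objective: idiomatic
-- what changed: Replaces A's single fused accumulator loop (string concatenation + running offset + dict mutation) with a filter comprehension producing stripped non-empty pairs, ' '.join for the text, and word-count prefix sums via itertools.accumulate zipped into the segment dict.
import Mathlib
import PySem

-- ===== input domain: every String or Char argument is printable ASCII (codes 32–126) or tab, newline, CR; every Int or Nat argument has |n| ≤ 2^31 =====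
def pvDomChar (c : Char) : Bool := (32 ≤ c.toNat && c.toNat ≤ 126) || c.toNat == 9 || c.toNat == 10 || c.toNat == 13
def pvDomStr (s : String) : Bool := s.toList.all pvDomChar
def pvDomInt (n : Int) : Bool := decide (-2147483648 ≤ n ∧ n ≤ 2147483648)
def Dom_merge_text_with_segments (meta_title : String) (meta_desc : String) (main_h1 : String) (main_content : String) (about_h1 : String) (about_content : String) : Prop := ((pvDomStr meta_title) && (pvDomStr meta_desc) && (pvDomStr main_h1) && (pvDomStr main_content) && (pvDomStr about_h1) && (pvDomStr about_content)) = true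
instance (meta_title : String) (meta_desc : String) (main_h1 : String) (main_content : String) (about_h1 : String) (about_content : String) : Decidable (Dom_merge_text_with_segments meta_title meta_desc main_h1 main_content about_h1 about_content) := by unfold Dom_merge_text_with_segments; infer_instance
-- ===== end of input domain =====

-- B: filter/strip pass + ' '.join + prefix-sum (accumulate) offsets instead of A's single fused accumulator loop (same cost; objective: idiomatic).

-- ===== PORT A =====
-- Python's dict literal `parts` has six distinct literal string keys; `.items()` iterates them in this insertion order.
def pvPartsA (meta_title : String) (meta_desc : String) (main_h1 : String) (main_content : String) (about_h1 : String) (about_content : String) : List (String × String) :=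
  [("meta_title", meta_title), ("meta_desc", meta_desc), ("main_h1", main_h1),
   ("main_content", main_content), ("about_h1", about_h1), ("about_content", about_content)]

-- one iteration of A's `for key, value in parts.items():` loop; state = (text_segments, full_text, current_start)
def pvStepA (st : PySem.Dict String (Int × Int) × List Char × Int) (kv : String × String) :
    PySem.Dict String (Int × Int) × List Char × Int :=
  let segment := PySem.Chars.strip kv.2.toList
  if segment = [] then st
  else
    let start := st.2.2
    let eend := start + ((PySem.Chars.split₀ (PySem.Chars.strip segment)).length : Int)
    (st.1.insert kv.1 (start, eend), st.2.1 ++ segment ++ [' '], eend)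

def merge_text_with_segments (meta_title : String) (meta_desc : String) (main_h1 : String) (main_content : String) (about_h1 : String) (about_content : String) : String × (List (String × Int × Int)) :=
  let r := (pvPartsA meta_title meta_desc main_h1 main_content about_h1 about_content).foldl
             pvStepA (PySem.Dict.empty, [], 0)
  (String.ofList (PySem.Chars.strip r.2.1), r.1.items)

-- ===== PORT B =====
def pvPartsB (meta_title : String) (meta_desc : String) (main_h1 : String) (main_content : String) (about_h1 : String) (about_content : String) : List (String × String) :=
  [("meta_title", meta_title), ("meta_desc", meta_desc), ("main_h1", main_h1),
   ("main_content", main_content), ("about_h1", about_h1), ("about_content", about_content)]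

-- Source B's `kept` comprehension: stripped non-empty (key, segment) pairs
def pvKept (ps : List (String × String)) : List (String × List Char) :=
  ps.filterMap (fun kv =>
    let s := PySem.Chars.strip kv.2.toList
    if s = [] then none else some (kv.1, s))

-- len(seg.split())
def pvWc (s : List Char) : Int := ((PySem.Chars.split₀ s).length : Int)

-- itertools.accumulate(word_counts) as a running sum
def pvAccumulate (acc : Int) : List Int → List Int
  | [] => []
  | w :: ws => (acc + w) :: pvAccumulate (acc + w) ws

def merge_text_with_segments_alt (meta_title : String) (meta_desc : String) (main_h1 : String) (main_content : String) (about_h1 : String) (about_content : String) : String × (List (String × Int × Int)) :=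
  let kept := pvKept (pvPartsB meta_title meta_desc main_h1 main_content about_h1 about_content)
  let full_text := PySem.Chars.join [' '] (kept.map (·.2))
  let ends := pvAccumulate 0 (kept.map (fun p => pvWc p.2))
  let starts := 0 :: ends.dropLast
  let segs := (kept.zip (starts.zip ends)).map (fun x => (x.1.1, x.2.1, x.2.2))
  (String.ofList full_text, segs)

-- ===== PRECONDITION & SPEC =====
def Spec_merge_text_with_segments (meta_title : String) (meta_desc : String) (main_h1 : String) (main_content : String) (about_h1 : String) (about_content : String) (out : String × (List (String × Int × Int))) : Prop := out = merge_text_with_segments_alt meta_title meta_desc main_h1 main_content about_h1 about_content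
instance (meta_title : String) (meta_desc : String) (main_h1 : String) (main_content : String) (about_h1 : String) (about_content : String) (out : String × (List (String × Int × Int))) : Decidable (Spec_merge_text_with_segments meta_title meta_desc main_h1 main_content about_h1 about_content out) := by unfold Spec_merge_text_with_segments; infer_instance

-- ===== CLAIM (what is proved, stated in full; the proofs are below) =====
def Claim_equal_merge_text_with_segments : Prop := ∀ (meta_title : String) (meta_desc : String) (main_h1 : String) (main_content : String) (about_h1 : String) (about_content : String), Dom_merge_text_with_segments meta_title meta_desc main_h1 main_content about_h1 about_content → Spec_merge_text_with_segments meta_title meta_desc main_h1 main_content about_h1 about_content (merge_text_with_segments meta_title meta_desc main_h1 main_content about_h1 about_content)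

-- ===== LEMMAS AND PROOFS =====

-- the unconditional loop A runs over the kept pairs (proof-only helper)
def pvStepA' (st : PySem.Dict String (Int × Int) × List Char × Int) (q : String × List Char) :
    PySem.Dict String (Int × Int) × List Char × Int :=
  (st.1.insert q.1 (st.2.2, st.2.2 + pvWc (PySem.Chars.strip q.2)), st.2.1 ++ q.2 ++ [' '], st.2.2 + pvWc (PySem.Chars.strip q.2))

-- the (start, end) assoc list both sides compute
def pvSpec : List (String × List Char) → Int → List (String × Int × Int)
  | [], _ => []
  | q :: t, cs => (q.1, cs, cs + pvWc q.2) :: pvSpec t (cs + pvWc q.2)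

theorem pv_fold_eq_kept (ps : List (String × String)) (st : PySem.Dict String (Int × Int) × List Char × Int) :
    ps.foldl pvStepA st = (pvKept ps).foldl pvStepA' st := by
  induction ps generalizing st with
  | nil => rfl
  | cons kv t ih =>
      by_cases h : PySem.Chars.strip kv.2.toList = [] <;>
        simp [pvKept, pvStepA, pvStepA', h, ih, pvWc]

theorem pv_lstrip_cons_of (c : Char) (t : List Char) (h : PySem.Chars.isspace c = false) :
    PySem.Chars.lstrip (c :: t) = c :: t := by
  simp [PySem.Chars.lstrip, h]

theorem pv_rstrip_append_of (x : List Char) (c : Char) (h : PySem.Chars.isspace c = false) :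
    PySem.Chars.rstrip (x ++ [c]) = x ++ [c] := by
  simp [PySem.Chars.rstrip, h]

theorem pv_rstrip_append_space (x : List Char) :
    PySem.Chars.rstrip (x ++ [' ']) = PySem.Chars.rstrip x := by
  simp [PySem.Chars.rstrip, show PySem.Chars.isspace ' ' = true from by decide]

-- a non-empty stripped string starts with a non-space character
theorem pv_strip_head (v : List Char) (h : PySem.Chars.strip v ≠ []) :
    ∃ c t, PySem.Chars.strip v = c :: t ∧ PySem.Chars.isspace c = false := by
  have hl : List.dropWhile PySem.Chars.isspace v ≠ [] := by
    intro he
    apply h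
    simp [PySem.Chars.strip, PySem.Chars.lstrip, PySem.Chars.rstrip, he]
  have hpref : PySem.Chars.strip v <+: PySem.Chars.lstrip v := by
    have h1 := List.dropWhile_suffix (l := (PySem.Chars.lstrip v).reverse) PySem.Chars.isspace
    have h2 := List.reverse_prefix.mpr h1
    simp only [PySem.Chars.strip, PySem.Chars.rstrip]
    simpa using h2
  obtain ⟨u, hu⟩ := hpref
  have hhead := List.head_dropWhile_not PySem.Chars.isspace (l := v) hl
  obtain ⟨c, t, hct⟩ := List.exists_cons_of_ne_nil h
  refine ⟨c, t, hct, ?_⟩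
  have hlv : List.dropWhile PySem.Chars.isspace v = c :: (t ++ u) := by
    show PySem.Chars.lstrip v = c :: (t ++ u)
    rw [← hu, hct]; simp
  simp only [hlv, List.head_cons] at hhead
  exact hhead
-- a non-empty stripped string ends with a non-space character
theorem pv_strip_last (v : List Char) (h : PySem.Chars.strip v ≠ []) :
    ∃ t c, PySem.Chars.strip v = t ++ [c] ∧ PySem.Chars.isspace c = false := by
  have hd : List.dropWhile PySem.Chars.isspace (PySem.Chars.lstrip v).reverse ≠ [] := by
    intro he
    apply h
    simp [PySem.Chars.strip, PySem.Chars.rstrip, he]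
  obtain ⟨c, t, hct⟩ := List.exists_cons_of_ne_nil hd
  have hhead := List.head_dropWhile_not PySem.Chars.isspace (l := (PySem.Chars.lstrip v).reverse) hd
  refine ⟨t.reverse, c, ?_, ?_⟩
  · rw [PySem.Chars.strip, PySem.Chars.rstrip, hct]; simp
  · simp only [hct, List.head_cons] at hhead; exact hhead

-- strip is idempotent
theorem pv_strip_strip (v : List Char) :
    PySem.Chars.strip (PySem.Chars.strip v) = PySem.Chars.strip v := by
  by_cases h : PySem.Chars.strip v = []
  · rw [h]; rfl
  · obtain ⟨c, t, hct, hc⟩ := pv_strip_head v h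
    obtain ⟨t', c', hct', hc'⟩ := pv_strip_last v h
    rw [PySem.Chars.strip]
    conv_lhs => rw [hct, pv_lstrip_cons_of c t hc, ← hct, hct']
    rw [pv_rstrip_append_of t' c' hc', ← hct']

theorem pv_kept_mem (ps : List (String × String)) (q : String × List Char) (hq : q ∈ pvKept ps) :
    q.2 ≠ [] ∧ PySem.Chars.strip q.2 = q.2 := by
  rw [pvKept, List.mem_filterMap] at hq
  obtain ⟨kv, _, hkv⟩ := hq
  dsimp only at hkv
  by_cases h : PySem.Chars.strip kv.2.toList = []
  · rw [if_pos h] at hkv; exact absurd hkv (by simp)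
  · rw [if_neg h] at hkv
    obtain rfl := Option.some.inj hkv
    exact ⟨h, pv_strip_strip _⟩

theorem pv_kept_keys_sublist (ps : List (String × String)) :
    List.Sublist ((pvKept ps).map (·.1)) (ps.map (·.1)) := by
  induction ps with
  | nil => simp [pvKept]
  | cons kv t ih =>
      by_cases h : PySem.Chars.strip kv.2.toList = [] <;>
        simp only [pvKept, List.filterMap_cons, h, if_pos, List.map_cons] at * <;>
        [exact ih.trans (List.sublist_cons_self _ _); exact ih.cons₂ kv.1]

-- full_text accumulated by the loop
theorem pv_fold_text (qs : List (String × List Char)) (st : PySem.Dict String (Int × Int) × List Char × Int) :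
    (qs.foldl pvStepA' st).2.1 = st.2.1 ++ qs.flatMap (fun q => q.2 ++ [' ']) := by
  induction qs generalizing st with
  | nil => simp
  | cons q t ih => simp [pvStepA', ih]

theorem pv_cat_eq_join (segs : List (List Char)) (h : segs ≠ []) :
    segs.flatMap (fun s => s ++ [' ']) = PySem.Chars.join [' '] segs ++ [' '] := by
  induction segs with
  | nil => exact absurd rfl h
  | cons s t ih =>
      cases t with
      | nil => simp [PySem.Chars.join_singleton]
      | cons s' t' => simp [PySem.Chars.join_cons_cons, ih (by simp)]

-- the joined text of non-empty stripped segments ends in a non-space character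
theorem pv_join_last (segs : List (List Char))
    (hne : segs ≠ []) (h : ∀ s ∈ segs, s ≠ [] ∧ PySem.Chars.strip s = s) :
    ∃ t c, PySem.Chars.join [' '] segs = t ++ [c] ∧ PySem.Chars.isspace c = false := by
  induction segs with
  | nil => exact absurd rfl hne
  | cons s t ih =>
      cases t with
      | nil =>
          obtain ⟨h1, h2⟩ := h s (by simp)
          obtain ⟨t', c, hct, hc⟩ := pv_strip_last s (by rw [h2]; exact h1)
          rw [h2] at hct
          exact ⟨t', c, by rw [PySem.Chars.join_singleton]; exact hct, hc⟩
      | cons s' t' =>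
          obtain ⟨u, c, huc, hc⟩ := ih (by simp) (fun x hx => h x (List.mem_cons_of_mem s hx))
          exact ⟨s ++ [' '] ++ u, c, by rw [PySem.Chars.join_cons_cons, huc]; simp, hc⟩

-- strip of A's accumulated text is B's join
theorem pv_strip_cat (qs : List (String × List Char))
    (h : ∀ q ∈ qs, q.2 ≠ [] ∧ PySem.Chars.strip q.2 = q.2) :
    PySem.Chars.strip (qs.flatMap (fun q => q.2 ++ [' '])) =
      PySem.Chars.join [' '] (qs.map (·.2)) := by
  cases qs with
  | nil => simp [PySem.Chars.join_nil]; rfl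
  | cons q t =>
      have hsegs : ∀ s ∈ (q :: t).map (·.2), s ≠ [] ∧ PySem.Chars.strip s = s := by
        intro s hs
        obtain ⟨p, hp, hps⟩ := List.mem_map.mp hs
        exact hps ▸ h p hp
      have hcat : (q :: t).flatMap (fun p => p.2 ++ [' ']) =
          (((q :: t).map (·.2)).flatMap (fun s => s ++ [' '])) := by
        simp [List.flatMap_map]
      rw [hcat, pv_cat_eq_join _ (by simp)]
      set J := PySem.Chars.join [' '] ((q :: t).map (·.2)) with hJ
      -- head of J is the head of q.2, a non-space character
      obtain ⟨hq1, hq2⟩ := h q (by simp)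
      obtain ⟨c, u, hcu, hc⟩ := pv_strip_head q.2 (by rw [hq2]; exact hq1)
      rw [hq2] at hcu
      have hJhead : ∃ r, J = c :: r := by
        cases t with
        | nil => exact ⟨u, by rw [hJ]; simp [PySem.Chars.join_singleton, hcu]⟩
        | cons q' t' =>
            refine ⟨u ++ [' '] ++ PySem.Chars.join [' '] ((q' :: t').map (·.2)), ?_⟩
            rw [hJ]; simp only [List.map_cons, PySem.Chars.join_cons_cons, hcu]; simp
      obtain ⟨r, hr⟩ := hJhead
      obtain ⟨w, c', hwc, hc'⟩ := pv_join_last ((q :: t).map (·.2)) (by simp) hsegs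
      rw [PySem.Chars.strip]
      have hl : PySem.Chars.lstrip (J ++ [' ']) = J ++ [' '] := by
        rw [hr]
        exact pv_lstrip_cons_of c (r ++ [' ']) hc
      rw [hl, pv_rstrip_append_space, hJ, hwc, pv_rstrip_append_of _ _ hc']

-- the dict accumulated by the loop, on fresh distinct keys
theorem pv_fold_items (qs : List (String × List Char))
    (d : PySem.Dict String (Int × Int)) (ft : List Char) (cs : Int)
    (hnd : (qs.map (·.1)).Nodup) (hf : ∀ k ∈ qs.map (·.1), d.contains k = false)
    (hs : ∀ q ∈ qs, PySem.Chars.strip q.2 = q.2) :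
    (qs.foldl pvStepA' (d, ft, cs)).1.items = d.items ++ pvSpec qs cs := by
  induction qs generalizing d ft cs with
  | nil => simp [pvSpec]
  | cons q t ih =>
      have hfq : d.contains q.1 = false := hf q.1 (by simp)
      have hnd' : (t.map (·.1)).Nodup := (List.nodup_cons.mp hnd).2
      have hq1 : q.1 ∉ t.map (·.1) := (List.nodup_cons.mp hnd).1
      have hsq : PySem.Chars.strip q.2 = q.2 := hs q (by simp)
      have hstep : pvStepA' (d, ft, cs) q =
          (d.insert q.1 (cs, cs + pvWc q.2), ft ++ q.2 ++ [' '], cs + pvWc q.2) := by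
        simp [pvStepA', hsq]
      rw [List.foldl_cons, hstep,
        ih _ _ _ hnd'
          (fun k hk => by
            rw [PySem.Dict.contains_insert]
            have : (k == q.1) = false := by
              simp only [beq_eq_false_iff_ne, ne_eq]
              exact fun he => hq1 (he ▸ hk)
            rw [this, hf k (List.mem_cons_of_mem _ hk)]; rfl)
          (fun p hp => hs p (List.mem_cons_of_mem _ hp)),
        PySem.Dict.items_insert_of_not_contains d _ hfq]
      simp [pvSpec]

theorem pv_accumulate_ne_nil (acc : Int) (ws : List Int) (h : ws ≠ []) :
    pvAccumulate acc ws ≠ [] := by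
  cases ws with
  | nil => exact absurd rfl h
  | cons w t => simp [pvAccumulate]

-- B's zip of (kept, starts, ends) is the same assoc list
theorem pv_zip_eq_spec (qs : List (String × List Char)) (acc : Int) :
    (qs.zip ((acc :: (pvAccumulate acc (qs.map (fun p => pvWc p.2))).dropLast).zip
        (pvAccumulate acc (qs.map (fun p => pvWc p.2))))).map
      (fun x => (x.1.1, x.2.1, x.2.2)) = pvSpec qs acc := by
  induction qs generalizing acc with
  | nil => simp [pvSpec]
  | cons q t ih =>
      cases t with
      | nil => simp [pvAccumulate, pvSpec]
      | cons q' t' =>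
          have hne : pvAccumulate (acc + pvWc q.2) ((q' :: t').map (fun p => pvWc p.2)) ≠ [] :=
            pv_accumulate_ne_nil _ _ (by simp)
          have e1 : pvAccumulate acc ((q :: q' :: t').map (fun p => pvWc p.2)) =
              (acc + pvWc q.2) :: pvAccumulate (acc + pvWc q.2) ((q' :: t').map (fun p => pvWc p.2)) := rfl
          have e2 : pvSpec (q :: q' :: t') acc =
              (q.1, acc, acc + pvWc q.2) :: pvSpec (q' :: t') (acc + pvWc q.2) := rfl
          rw [e1, e2, List.dropLast_cons_of_ne_nil hne, List.zip_cons_cons, List.zip_cons_cons,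
            List.map_cons]
          exact congrArg _ (ih (acc + pvWc q.2))

-- the whole equivalence over an arbitrary parts list with distinct keys
theorem pv_main (ps : List (String × String)) (hnd : (ps.map (·.1)).Nodup) :
    (String.ofList (PySem.Chars.strip (ps.foldl pvStepA (PySem.Dict.empty, [], 0)).2.1),
      (ps.foldl pvStepA (PySem.Dict.empty, [], 0)).1.items) =
    (String.ofList (PySem.Chars.join [' '] ((pvKept ps).map (·.2))),
      ((pvKept ps).zip ((0 :: (pvAccumulate 0 ((pvKept ps).map (fun p => pvWc p.2))).dropLast).zip
          (pvAccumulate 0 ((pvKept ps).map (fun p => pvWc p.2))))).map (fun x => (x.1.1, x.2.1, x.2.2))) := by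
  have hmem := pv_kept_mem ps
  have hndk : ((pvKept ps).map (·.1)).Nodup := (pv_kept_keys_sublist ps).nodup hnd
  rw [pv_fold_eq_kept]
  refine Prod.ext ?_ ?_
  · show String.ofList (PySem.Chars.strip ((pvKept ps).foldl pvStepA' (PySem.Dict.empty, [], 0)).2.1) = _
    rw [pv_fold_text, List.nil_append, pv_strip_cat _ hmem]
  · show ((pvKept ps).foldl pvStepA' (PySem.Dict.empty, [], 0)).1.items = _
    rw [pv_fold_items _ _ _ _ hndk (fun k _ => PySem.Dict.contains_empty k)
        (fun q hq => (hmem q hq).2)]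
    have : (PySem.Dict.empty : PySem.Dict String (Int × Int)).items = [] := rfl
    rw [this, List.nil_append, ← pv_zip_eq_spec (pvKept ps) 0]

-- ===== VERDICT (by name: the statement is the Claim_ definition above) =====
theorem merge_text_with_segments_spec : Claim_equal_merge_text_with_segments := by
  intro mt md h1 mc ah ac _
  show merge_text_with_segments mt md h1 mc ah ac = merge_text_with_segments_alt mt md h1 mc ah ac
  exact pv_main (pvPartsA mt md h1 mc ah ac) (by simp [pvPartsA])
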